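-- pv_equiv track=rewrite | github.com/Seorin-Kim/AlgorithmPractice | 프로그래머스/3/258709. 주사위 고르기/주사위 고르기.py | solution
-- ===== SOURCE A (Python) =====
-- def solution(dice):
--     from itertools import combinations, product
--     from bisect import bisect_left
--
--     dice_combs = list(combinations(range(len(dice)), len(dice)//2))
--     max_cnt = 0
--     for dice_comb in dice_combs:
--         a_dice = [dice[i] for i in dice_comb]
--         b_dice = list(filter(lambda x: x not in a_dice, dice))
--
--         a_score = [sum(nums) for nums in product(*a_dice)]
--         b_score = [sum(nums) for nums in product(*b_dice)]
--         b_score.sort()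
--
--         cnt = 0
--         for a in a_score:
--             cnt += bisect_left(b_score, a)
--
--             if cnt > max_cnt:
--                 max_cnt = cnt
--                 result = [d+1 for d in dice_comb]
--
--     return result
-- ===== SOURCE B (Python) =====
-- def solution(dice):
--     from itertools import combinations
--     from collections import Counter
--
--     def dist(ds):
--         # distribution of roll sums: convolve the per-die face counters
--         c = Counter({0: 1})
--         for d in ds:
--             nc = Counter()
--             for s, m in c.items():
--                 for x in d:
--                     nc[s + x] += m
--             c = nc
--         return c
--
--     n = len(dice)
--     best_cnt = 0
--     best = None
--     for comb in combinations(range(n), n // 2):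
--         chosen = [dice[i] for i in comb]
--         others = [d for d in dice if d not in chosen]
--         a_items = sorted(dist(chosen).items())
--         b_items = sorted(dist(others).items())
--         cnt = 0
--         prefix = 0
--         j = 0
--         for sa, ma in a_items:
--             while j < len(b_items) and b_items[j][0] < sa:
--                 prefix += b_items[j][1]
--                 j += 1
--             cnt += ma * prefix
--         if cnt > best_cnt:
--             best_cnt = cnt
--             best = [i + 1 for i in comb]
--     return best
-- ===== Notes on version B (the rewrite author's own statement) =====
-- stated objective: alternative
-- what changed: A enumerates every roll tuple with itertools.product and bisects each own score into the opponent's sorted raw score list; B never materializes the roll tuples: it convolves per-die face Counters into (sum, multiplicity) distributions and counts winning pairs with multiplicities in one merge pass over the two sorted item lists, comparing each partition's total against the best once.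
import Mathlib
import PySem

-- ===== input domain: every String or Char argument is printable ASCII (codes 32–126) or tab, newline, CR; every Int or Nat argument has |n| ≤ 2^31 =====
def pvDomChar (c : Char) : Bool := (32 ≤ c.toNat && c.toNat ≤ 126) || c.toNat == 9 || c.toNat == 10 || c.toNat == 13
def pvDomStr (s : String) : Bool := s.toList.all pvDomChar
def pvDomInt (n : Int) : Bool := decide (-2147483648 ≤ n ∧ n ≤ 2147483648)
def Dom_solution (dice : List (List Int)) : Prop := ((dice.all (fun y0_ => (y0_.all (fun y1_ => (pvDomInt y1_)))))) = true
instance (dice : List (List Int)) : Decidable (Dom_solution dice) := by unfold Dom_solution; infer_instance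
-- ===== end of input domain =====

-- B replaces A's per-partition itertools.product enumeration of all roll tuples by a Counter
-- convolution of per-die face distributions, then counts winning pairs with multiplicities in
-- one merge pass over the two sorted (sum, multiplicity) item lists (alternative algorithm);
-- return values agree on Pre_ (A raises UnboundLocalError when no partition ever wins a roll).


-- ===== PORT A =====
-- shared sub-expressions (written identically in both Pythons):
-- [dice[i] for i in comb]
def pvChoose (dice : List (List Int)) (comb : List Int) : List (List Int) :=
  comb.map (fun i => (PySem.List.pyGet? dice i).getD [])
-- list(filter(lambda x: x not in a_dice, dice)) / [d for d in dice if d not in chosen]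
def pvOthers (dice : List (List Int)) (ad : List (List Int)) : List (List Int) :=
  dice.filter (fun d => decide (d ∉ ad))
-- A only: [sum(nums) for nums in product(*ds)] (itertools.product order, sums left to right)
def prodSums (ds : List (List Int)) : List Int :=
  ds.foldl (fun acc d => acc.flatMap (fun s => d.map (fun x => s + x))) [0]

-- one iteration of A's 'for dice_comb in dice_combs' loop; state = (max_cnt, result?)
-- (result is unbound until first set: modeled as Option, none = unbound)
def stepA (dice : List (List Int)) (st : Nat × Option (List Int)) (comb : List Int) :
    Nat × Option (List Int) :=
  let ad := pvChoose dice comb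
  let bd := pvOthers dice ad
  let aScore := prodSums ad
  let bScore := PySem.List.sorted (prodSums bd) (fun x => x) false
  let r := aScore.foldl
    (fun (s : Nat × Nat × Option (List Int)) a =>
      let cnt := s.1 + PySem.List.bisectLeft bScore a
      if s.2.1 < cnt then (cnt, cnt, some (comb.map (fun d => d + 1)))
      else (cnt, s.2.1, s.2.2))
    (0, st.1, st.2)
  (r.2.1, r.2.2)

def solution (dice : List (List Int)) : List Int :=
  ((PySem.List.combinations (PySem.List.pyRange 0 (dice.length : Int) 1) (dice.length / 2)).foldl
      (stepA dice) (0, none)).2.getD []    -- unbound result = UnboundLocalError, outside Pre_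

-- ===== PORT B =====
-- pvDist(ds): convolve per-die face Counters; one step of 'for d in ds' (nc built by the
-- 'for s, m in c.items(): for x in d: nc[s+x] += m' double loop)
def distStep (c : PySem.Dict Int Int) (d : List Int) : PySem.Dict Int Int :=
  c.items.foldl (fun nc sm =>
    d.foldl (fun nc x => nc.insert (sm.1 + x) (nc.getD (sm.1 + x) 0 + sm.2)) nc)
    PySem.Dict.empty

def pvDist (ds : List (List Int)) : PySem.Dict Int Int :=
  ds.foldl distStep (PySem.Dict.empty.insert 0 1)   -- Counter({0: 1})

-- the 'while j < len(b_items) and b_items[j][0] < sa: prefix += b_items[j][1]; j += 1' loop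
def advance2 (bs : List (Int × Int)) (sa : Int) (j : Nat) (pre : Int) : Nat × Int :=
  if h : j < bs.length then
    (if (bs[j]).1 < sa then advance2 bs sa (j + 1) (pre + (bs[j]).2) else (j, pre))
  else (j, pre)
termination_by bs.length - j

-- the 'for sa, ma in a_items' merge loop; state = (cnt, j, prefix)
def innerB (bI aI : List (Int × Int)) : Int × Nat × Int :=
  aI.foldl (fun (s : Int × Nat × Int) p =>
    let jp := advance2 bI p.1 s.2.1 s.2.2
    (s.1 + p.2 * jp.2, jp.1, jp.2)) (0, 0, 0)

-- one iteration of B's partition loop; state = (best_cnt, best?)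
-- (sorted(c.items()): Counter keys are distinct, so Python's tuple sort is the sort by key)
def stepB (dice : List (List Int)) (st : Int × Option (List Int)) (comb : List Int) :
    Int × Option (List Int) :=
  let chosen := pvChoose dice comb
  let others := pvOthers dice chosen
  let aItems := PySem.List.sorted (pvDist chosen).items (fun p => p.1) false
  let bItems := PySem.List.sorted (pvDist others).items (fun p => p.1) false
  let r := innerB bItems aItems
  if st.1 < r.1 then (r.1, some (comb.map (fun i => i + 1))) else st

def solution_alt (dice : List (List Int)) : List Int :=
  ((PySem.List.combinations (PySem.List.pyRange 0 (dice.length : Int) 1) (dice.length / 2)).foldl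
      (stepB dice) (0, none)).2.getD []

-- ===== PRECONDITION & SPEC =====
-- best single roll of a half (sum of per-die maxima); none if some die is empty
def pvMaxSum? (ds : List (List Int)) : Option Int :=
  ds.foldr (fun d acc => (d.max?).bind (fun m => acc.map (fun s => m + s))) (some 0)
def pvMinSum? (ds : List (List Int)) : Option Int :=
  ds.foldr (fun d acc => (d.min?).bind (fun m => acc.map (fun s => m + s))) (some 0)
-- some choice of half the dice whose best roll strictly beats the worst roll of the others
def pvWinnable (dice : List (List Int)) : Bool :=
  (PySem.List.combinations (PySem.List.pyRange 0 (dice.length : Int) 1) (dice.length / 2)).any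
    (fun c =>
      let ad := pvChoose dice c
      match pvMaxSum? ad, pvMinSum? (pvOthers dice ad) with
      | some ma, some mb => decide (mb < ma)
      | _, _ => false)
-- Pre_ excludes exactly the inputs on which A raises UnboundLocalError (no partition ever
-- wins a single roll comparison, so 'result' is never assigned); A returns on all others.
def Pre_solution (dice : List (List Int)) : Prop := pvWinnable dice = true
instance (dice : List (List Int)) : Decidable (Pre_solution dice) := by
  unfold Pre_solution; infer_instance

def pvWitness_solution : List (List Int) := [[1], [2]]

def Spec_solution (dice : List (List Int)) (out : List Int) : Prop := out = solution_alt dice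
instance (dice : List (List Int)) (out : List Int) : Decidable (Spec_solution dice out) := by
  unfold Spec_solution; infer_instance

-- ===== CLAIM (what is proved, stated in full; the proofs are below) =====
def Claim_equal_solution : Prop :=
  ∀ (dice : List (List Int)), Dom_solution dice → Pre_solution dice →
    Spec_solution dice (solution dice)

-- ===== LEMMAS AND PROOFS =====

-- in a ≤-sorted list, the elements < a are exactly the first countP-many
theorem countP_lt_char (a : Int) :
    ∀ (bs : List Int), bs.Pairwise (· ≤ ·) →
      ∀ (j : Nat) (hj : j < bs.length),
        (bs[j] < a ↔ j < bs.countP (fun x => decide (x < a))) := by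
  intro bs
  induction bs with
  | nil => intro _ j hj; simp at hj
  | cons x t ih =>
    intro hp j hj
    rcases List.pairwise_cons.mp hp with ⟨hx, ht⟩
    by_cases hxa : x < a
    · cases j with
      | zero => simp [hxa]
      | succ k =>
        have hk : k < t.length := by simpa using hj
        have := ih ht k hk
        simp only [List.getElem_cons_succ, List.countP_cons, hxa]
        simpa [Nat.lt_succ_iff, Nat.succ_lt_succ_iff] using this
    · have htz : t.countP (fun x => decide (x < a)) = 0 := by
        rw [List.countP_eq_zero]
        intro y hy
        have : x ≤ y := hx y hy
        simp only [decide_eq_true_eq]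
        omega
      have hcz : (x :: t).countP (fun x => decide (x < a)) = 0 := by
        simp [hxa, htz]
      rw [hcz]
      cases j with
      | zero => simp [hxa]
      | succ k =>
        have hk : k < t.length := by simpa using hj
        have hxy : x ≤ t[k] := hx _ (List.getElem_mem hk)
        simp only [List.getElem_cons_succ]
        constructor
        · intro h; omega
        · intro h; omega

theorem bisectLeft_eq_countP (bs : List Int) (a : Int) (h : bs.Pairwise (· ≤ ·)) :
    PySem.List.bisectLeft bs a = bs.countP (fun x => decide (x < a)) := by
  obtain ⟨hle, hlt, hge⟩ := PySem.List.bisectLeft_spec bs a h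
  have hKle : bs.countP (fun x => decide (x < a)) ≤ bs.length := List.countP_le_length
  set k := PySem.List.bisectLeft bs a with hk
  set K := bs.countP (fun x => decide (x < a)) with hK
  rcases lt_trichotomy k K with hlt' | heq | hgt
  · exfalso
    have hkl : k < bs.length := lt_of_lt_of_le hlt' hKle
    have h1 : a ≤ bs[k] := hge k hkl (le_refl k)
    have h2 : bs[k] < a := (countP_lt_char a bs h k hkl).mpr hlt'
    omega
  · exact heq
  · exfalso
    have hKl : K < bs.length := lt_of_lt_of_le hgt hle
    have h1 : bs[K] < a := hlt K hKl hgt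
    have h2 : K < K := (countP_lt_char a bs h K hKl).mp h1
    omega

-- closed form of A's inner accumulation loop (invariant: the running max m dominates cnt = c)
theorem innerA_closed (bScore : List Int) (res : Option (List Int)) :
    ∀ (as_ : List Int) (c m : Nat) (r : Option (List Int)), c ≤ m →
      (as_.foldl
        (fun (s : Nat × Nat × Option (List Int)) a =>
          let cnt := s.1 + PySem.List.bisectLeft bScore a
          if s.2.1 < cnt then (cnt, cnt, res) else (cnt, s.2.1, s.2.2))
        (c, m, r))
      = (c + (as_.map (fun a => PySem.List.bisectLeft bScore a)).sum,
         if m < c + (as_.map (fun a => PySem.List.bisectLeft bScore a)).sum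
           then c + (as_.map (fun a => PySem.List.bisectLeft bScore a)).sum else m,
         if m < c + (as_.map (fun a => PySem.List.bisectLeft bScore a)).sum then res else r) := by
  intro as_
  induction as_ with
  | nil =>
    intro c m r hcm
    simp only [List.foldl_nil, List.map_nil, List.sum_nil, Nat.add_zero]
    have hnc : ¬ m < c := by omega
    rw [if_neg hnc, if_neg hnc]
  | cons a t ih =>
    intro c m r hcm
    simp only [List.foldl_cons, List.map_cons, List.sum_cons]
    by_cases hcase : m < c + PySem.List.bisectLeft bScore a
    · rw [if_pos hcase, ih _ _ _ (le_refl _)]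
      simp only [Prod.mk.injEq]
      refine ⟨by omega, by split_ifs <;> omega, by split_ifs <;> first | rfl | omega⟩
    · rw [if_neg hcase, ih _ _ _ (by omega)]
      simp only [Prod.mk.injEq]
      refine ⟨by omega, by split_ifs <;> omega, by split_ifs <;> first | rfl | omega⟩

-- ---------- B-side: the merge loop ----------

-- prefix sum of multiplicities / total multiplicity of keys < k
def sumTake (bs : List (Int × Int)) (j : Nat) : Int := ((bs.take j).map (fun p => p.2)).sum
def filtSum (bs : List (Int × Int)) (k : Int) : Int :=
  ((bs.filter (fun p => decide (p.1 < k))).map (fun p => p.2)).sum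

theorem kcount_lt_char (sa : Int) (bs : List (Int × Int))
    (h : bs.Pairwise (fun p q => p.1 ≤ q.1)) (j : Nat) (hj : j < bs.length) :
    ((bs[j]).1 < sa ↔ j < bs.countP (fun p => decide (p.1 < sa))) := by
  have hm : (bs.map (fun p => p.1)).Pairwise (· ≤ ·) := (List.pairwise_map).mpr h
  have hj' : j < (bs.map (fun p => p.1)).length := by simpa using hj
  have hch := countP_lt_char sa (bs.map (fun p => p.1)) hm j hj'
  rw [List.getElem_map, List.countP_map] at hch
  exact hch

theorem sumTake_succ (bs : List (Int × Int)) (j : Nat) (h : j < bs.length) :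
    sumTake bs (j + 1) = sumTake bs j + (bs[j]).2 := by
  unfold sumTake
  rw [List.take_succ_eq_append_getElem h, List.map_append, List.sum_append]
  simp

-- the while-loop reaches the rank of sa, accumulating the matching prefix sum
theorem advance2_eq (bs : List (Int × Int)) (sa : Int)
    (h : bs.Pairwise (fun p q => p.1 ≤ q.1)) :
    ∀ (n j : Nat), bs.countP (fun p => decide (p.1 < sa)) - j ≤ n →
      j ≤ bs.countP (fun p => decide (p.1 < sa)) →
      advance2 bs sa j (sumTake bs j)
        = (bs.countP (fun p => decide (p.1 < sa)),
           sumTake bs (bs.countP (fun p => decide (p.1 < sa)))) := by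
  intro n
  induction n with
  | zero =>
    intro j hn hj
    have hje : j = bs.countP (fun p => decide (p.1 < sa)) := by omega
    rw [advance2]
    split
    · rename_i hlen
      have hnb : ¬ (bs[j]).1 < sa := by
        intro hc
        have := (kcount_lt_char sa bs h j hlen).mp hc
        omega
      rw [if_neg hnb, hje]
    · rw [hje]
  | succ m ih =>
    intro j hn hj
    rcases Nat.lt_or_ge j (bs.countP (fun p => decide (p.1 < sa))) with hlt' | hge
    · have hjl : j < bs.length := lt_of_lt_of_le hlt' List.countP_le_length
      have hba : (bs[j]).1 < sa := (kcount_lt_char sa bs h j hjl).mpr hlt'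
      rw [advance2]
      simp only [hjl, dif_pos, hba, if_pos]
      rw [← sumTake_succ bs j hjl]
      exact ih (j + 1) (by omega) (by omega)
    · have hje : j = bs.countP (fun p => decide (p.1 < sa)) := by omega
      rw [advance2]
      split
      · rename_i hlen
        have hnb : ¬ (bs[j]).1 < sa := by
          intro hc
          have := (kcount_lt_char sa bs h j hlen).mp hc
          omega
        rw [if_neg hnb, hje]
      · rw [hje]

-- on a key-sorted list, the prefix of length rank(sa) is exactly the keys < sa
theorem sumTake_rank_eq_filtSum (sa : Int) :
    ∀ (bs : List (Int × Int)), bs.Pairwise (fun p q => p.1 ≤ q.1) →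
      sumTake bs (bs.countP (fun p => decide (p.1 < sa))) = filtSum bs sa := by
  intro bs
  induction bs with
  | nil => intro _; simp [sumTake, filtSum]
  | cons p t ih =>
    intro hp
    rcases List.pairwise_cons.mp hp with ⟨hx, ht⟩
    by_cases h1 : p.1 < sa
    · have hcp : (p :: t).countP (fun q => decide (q.1 < sa))
          = t.countP (fun q => decide (q.1 < sa)) + 1 := by simp [h1]
      have hfp : (p :: t).filter (fun q => decide (q.1 < sa))
          = p :: t.filter (fun q => decide (q.1 < sa)) := by simp [h1]
      have hih := ih ht
      unfold sumTake filtSum at hih ⊢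
      rw [hcp, hfp, List.take_succ_cons, List.map_cons, List.sum_cons, List.map_cons,
        List.sum_cons, hih]
    · have hz : (p :: t).countP (fun q => decide (q.1 < sa)) = 0 := by
        rw [List.countP_eq_zero]
        intro q hq
        rcases List.mem_cons.mp hq with hq | hq
        · subst hq; simpa using h1
        · have := hx q hq; simp only [decide_eq_true_eq]; omega
      have hf : (p :: t).filter (fun q => decide (q.1 < sa)) = [] := by
        rw [List.filter_eq_nil_iff]
        intro q hq
        rcases List.mem_cons.mp hq with hq | hq
        · subst hq; simpa using h1
        · have := hx q hq; simp only [decide_eq_true_eq]; omega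
      unfold sumTake filtSum
      rw [hz, hf]
      simp

-- closed form of B's merge loop
theorem innerB_closed (bs : List (Int × Int)) (hb : bs.Pairwise (fun p q => p.1 ≤ q.1)) :
    ∀ (as_ : List (Int × Int)), as_.Pairwise (fun p q => p.1 ≤ q.1) →
    ∀ (c : Int) (j : Nat), (∀ p ∈ as_, j ≤ bs.countP (fun q => decide (q.1 < p.1))) →
    (as_.foldl (fun (s : Int × Nat × Int) p =>
        let jp := advance2 bs p.1 s.2.1 s.2.2
        (s.1 + p.2 * jp.2, jp.1, jp.2)) (c, j, sumTake bs j)).1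
    = c + (as_.map (fun p => p.2 * filtSum bs p.1)).sum := by
  intro as_
  induction as_ with
  | nil => intro _ c j _; simp
  | cons p t ih =>
    intro hp c j hj
    rcases List.pairwise_cons.mp hp with ⟨ha, ht⟩
    have hja : j ≤ bs.countP (fun q => decide (q.1 < p.1)) := hj p (by simp)
    have hadv : advance2 bs p.1 j (sumTake bs j)
        = (bs.countP (fun q => decide (q.1 < p.1)),
           sumTake bs (bs.countP (fun q => decide (q.1 < p.1)))) :=
      advance2_eq bs p.1 hb _ j (le_refl _) hja
    simp only [List.foldl_cons, hadv]
    rw [ih ht _ _ ?_]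
    · rw [sumTake_rank_eq_filtSum p.1 bs hb]
      simp only [List.map_cons, List.sum_cons]
      ring
    · intro q hq
      apply List.countP_mono_left
      intro x _ hx
      simp only [decide_eq_true_eq] at *
      have := ha q hq
      omega

-- ---------- B-side: the Counter convolution ----------

-- running 'nc[p.1] += p.2' over a list of (key, add) pairs
theorem bump_getD :
    ∀ (ps : List (Int × Int)) (nc : PySem.Dict Int Int) (k : Int),
      (ps.foldl (fun nc p => nc.insert p.1 (nc.getD p.1 0 + p.2)) nc).getD k 0
      = nc.getD k 0 + ((ps.filter (fun p => decide (p.1 = k))).map (fun p => p.2)).sum := by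
  intro ps
  induction ps with
  | nil => intro nc k; simp
  | cons p t ih =>
    intro nc k
    simp only [List.foldl_cons]
    rw [ih]
    by_cases hk : p.1 = k
    · rw [List.filter_cons_of_pos (by simpa using hk), List.map_cons, List.sum_cons,
        PySem.Dict.getD_insert, if_pos hk.symm, hk]
      omega
    · rw [List.filter_cons_of_neg (by simpa using hk), PySem.Dict.getD_insert,
        if_neg (fun hc => hk hc.symm)]

theorem mapFilterSum (d : List Int) (s m k : Int) :
    (((d.map (fun x => (s + x, m))).filter (fun p => decide (p.1 = k))).map (fun p => p.2)).sum
    = m * (d.countP (fun x => decide (s + x = k)) : Int) := by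
  induction d with
  | nil => simp
  | cons x t ih =>
    by_cases h : s + x = k
    · have hT : decide (s + x = k) = true := by simpa using h
      rw [List.map_cons, List.filter_cons_of_pos (by exact hT)]
      simp only [List.map_cons, List.sum_cons, ih, List.countP_cons, hT]
      push_cast
      ring
    · have hF : decide (s + x = k) = false := by simpa using h
      rw [List.map_cons, List.filter_cons_of_neg (by simpa using h)]
      simp only [ih, List.countP_cons, hF]
      simp

theorem flatFilterSum (items : List (Int × Int)) (d : List Int) (k : Int) :
    (((items.flatMap (fun sm => d.map (fun x => (sm.1 + x, sm.2)))).filter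
        (fun p => decide (p.1 = k))).map (fun p => p.2)).sum
    = (items.map (fun sm => sm.2 * (d.countP (fun x => decide (sm.1 + x = k)) : Int))).sum := by
  induction items with
  | nil => simp
  | cons sm t ih =>
    simp only [List.flatMap_cons, List.filter_append, List.map_append, List.sum_append,
      List.map_cons, List.sum_cons, ih, mapFilterSum]

theorem countShift (d : List Int) (s k : Int) :
    (d.map (fun x => s + x)).count k = d.countP (fun x => decide (s + x = k)) := by
  induction d with
  | nil => simp
  | cons x t ih =>
    simp only [List.map_cons, List.count_cons, List.countP_cons, ih, beq_iff_eq]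
    by_cases h : s + x = k <;> simp [h]

theorem countFlat (l d : List Int) (k : Int) :
    (l.flatMap (fun s => d.map (fun x => s + x))).count k
    = (l.map (fun s => d.countP (fun x => decide (s + x = k)))).sum := by
  induction l with
  | nil => simp
  | cons s t ih =>
    simp only [List.flatMap_cons, List.count_append, List.map_cons, List.sum_cons, ih,
      countShift]

theorem castSum {α : Type} (l : List α) (f : α → Nat) :
    (l.map (fun a => ((f a : Nat) : Int))).sum = ((l.map f).sum : Int) := by
  induction l with
  | nil => simp
  | cons a t ih => simp only [List.map_cons, List.sum_cons, ih]; push_cast; ring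

theorem sum_ite_single (g : Int → Int) (a : Int) :
    ∀ (ks : List Int), ks.Nodup → a ∈ ks →
      (ks.map (fun k => if k = a then g k else 0)).sum = g a := by
  intro ks
  induction ks with
  | nil => intro _ h; simp at h
  | cons b t ih =>
    intro hnd ha
    rcases List.nodup_cons.mp hnd with ⟨hb, ht⟩
    by_cases hba : b = a
    · subst hba
      have hz : (t.map (fun k => if k = b then g k else 0)).sum = 0 := by
        apply List.sum_eq_zero
        intro x hx
        obtain ⟨k, hk, hke⟩ := List.mem_map.mp hx
        have : k ≠ b := fun hc => hb (hc ▸ hk)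
        simp [this] at hke
        omega
      simp [hz]
    · have ha' : a ∈ t := by
        rcases List.mem_cons.mp ha with h | h
        · exact absurd h.symm hba
        · exact h
      simp only [List.map_cons, List.sum_cons, if_neg hba, ih ht ha']
      ring

-- grouping: summing g over a list = summing count · g over any nodup key cover
theorem countG (g : Int → Int) :
    ∀ (l ks : List Int), ks.Nodup → (∀ x ∈ l, x ∈ ks) →
      (ks.map (fun k => (l.count k : Int) * g k)).sum = (l.map g).sum := by
  intro l
  induction l with
  | nil => intro ks _ _; simp
  | cons a t ih =>
    intro ks hnd hsub
    have h1 : ks.map (fun k => (((a :: t).count k : Nat) : Int) * g k)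
        = ks.map (fun k => ((t.count k : Int) * g k) + (if k = a then g k else 0)) := by
      apply List.map_congr_left
      intro k _
      rw [List.count_cons]
      by_cases hk : k = a
      · subst hk
        have hb : (k == k) = true := by simp
        rw [hb, if_pos rfl, if_pos rfl]
        push_cast
        ring
      · have hb : (a == k) = false := by simpa using fun hc => hk hc.symm
        rw [hb, if_neg (by simp), if_neg hk]
        push_cast
        ring
    rw [h1, List.sum_map_add, sum_ite_single g a ks hnd (hsub a (by simp)),
      ih ks hnd (fun x hx => hsub x (by simp [hx]))]
    simp only [List.map_cons, List.sum_cons]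
    ring

-- invariant of pvDist: a Dict whose getD is the multiset of partial sums
def goodC (c : PySem.Dict Int Int) (l : List Int) : Prop :=
  c.keys.Nodup ∧ (∀ s ∈ l, s ∈ c.keys) ∧ ∀ k : Int, c.getD k 0 = (l.count k : Int)

theorem distStep_flat (c : PySem.Dict Int Int) (d : List Int) :
    distStep c d = (c.items.flatMap (fun sm => d.map (fun x => (sm.1 + x, sm.2)))).foldl
      (fun nc p => nc.insert p.1 (nc.getD p.1 0 + p.2)) PySem.Dict.empty := by
  rw [List.foldl_flatMap]
  unfold distStep
  simp only [List.foldl_map]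

theorem goodC_step (c : PySem.Dict Int Int) (d : List Int) (l : List Int) (h : goodC c l) :
    goodC (distStep c d) (l.flatMap (fun s => d.map (fun x => s + x))) := by
  obtain ⟨hnd, hsub, hcnt⟩ := h
  rw [distStep_flat]
  set ps := c.items.flatMap (fun sm => d.map (fun x => (sm.1 + x, sm.2))) with hps
  have hkeys : (ps.foldl (fun nc p => nc.insert p.1 (nc.getD p.1 0 + p.2))
        PySem.Dict.empty).keys = PySem.Set.update PySem.Dict.empty.keys (ps.map (fun p => p.1)) :=
    PySem.Dict.keys_foldl_insert_key ps (fun p => p.1) (fun nc p => nc.getD p.1 0 + p.2) _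
  refine ⟨?_, ?_, ?_⟩
  · exact PySem.Dict.nodup_keys_foldl_insert_key ps (fun p => p.1)
      (fun nc p => nc.getD p.1 0 + p.2) _ (by simp [PySem.Dict.keys_empty])
  · intro s' hs'
    rw [hkeys, PySem.Dict.keys_empty]
    have hupd : PySem.Set.update ([] : PySem.Set Int) (ps.map (fun p => p.1))
        = PySem.Set.ofList (ps.map (fun p => p.1)) := by
      rw [PySem.Set.ofList_eq_foldl]; rfl
    rw [hupd, PySem.Set.mem_ofList]
    obtain ⟨s, hs, hs'mem⟩ := List.mem_flatMap.mp hs'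
    obtain ⟨x, hx, hxe⟩ := List.mem_map.mp hs'mem
    obtain ⟨sm, hsm, hsm1⟩ := List.mem_map.mp (by
      have : s ∈ c.keys := hsub s hs
      simpa only [PySem.Dict.keys] using this)
    apply List.mem_map.mpr
    refine ⟨(sm.1 + x, sm.2), ?_, ?_⟩
    · exact List.mem_flatMap.mpr ⟨sm, hsm, List.mem_map.mpr ⟨x, hx, rfl⟩⟩
    · simp [hsm1, hxe]
  · intro k
    rw [bump_getD ps PySem.Dict.empty k, PySem.Dict.getD_empty, hps, flatFilterSum]
    have hitems : c.items = c.keys.map (fun k' => (k', c.getD k' 0)) :=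
      PySem.Dict.items_eq_map_keys c hnd 0
    rw [hitems, List.map_map]
    have h2 : (c.keys.map ((fun sm : Int × Int =>
          sm.2 * (d.countP (fun x => decide (sm.1 + x = k)) : Int)) ∘
          (fun k' => (k', c.getD k' 0))))
        = c.keys.map (fun k' => (l.count k' : Int) *
            (d.countP (fun x => decide (k' + x = k)) : Int)) := by
      apply List.map_congr_left
      intro k' _
      simp [Function.comp, hcnt k']
    rw [h2, countG (fun k' => (d.countP (fun x => decide (k' + x = k)) : Int)) l c.keys hnd hsub,
      castSum, countFlat]
    ring

theorem goodC_fold :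
    ∀ (ds : List (List Int)) (c : PySem.Dict Int Int) (l : List Int), goodC c l →
      goodC (ds.foldl distStep c)
        (ds.foldl (fun acc d => acc.flatMap (fun s => d.map (fun x => s + x))) l) := by
  intro ds
  induction ds with
  | nil => intro c l h; exact h
  | cons d t ih =>
    intro c l h
    exact ih _ _ (goodC_step c d l h)

theorem goodC_init : goodC (PySem.Dict.empty.insert (0 : Int) (1 : Int)) [0] := by
  have hitems : (PySem.Dict.empty.insert (0 : Int) (1 : Int)).items = [((0 : Int), (1 : Int))] := by
    decide
  refine ⟨?_, ?_, ?_⟩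
  · simp only [PySem.Dict.keys, hitems]; simp
  · intro s hs
    simp only [PySem.Dict.keys, hitems]
    simpa using hs
  · intro k
    rw [PySem.Dict.getD_insert, PySem.Dict.getD_empty]
    by_cases hk : k = 0
    · subst hk; simp
    · have hb : ((0 : Int) == k) = false := by simpa using fun hc => hk hc.symm
      simp [hk, List.count_cons, hb]

theorem goodC_dist (ds : List (List Int)) : goodC (pvDist ds) (prodSums ds) := by
  unfold pvDist prodSums
  exact goodC_fold ds _ [0] goodC_init

-- ---------- per-partition count equality ----------

theorem filter_sum_ite (f : Int → Int) (p : Int → Prop) [DecidablePred p] :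
    ∀ (ks : List Int),
      ((ks.filter (fun x => decide (p x))).map f).sum
      = (ks.map (fun x => f x * (if p x then 1 else 0))).sum := by
  intro ks
  induction ks with
  | nil => simp
  | cons b t ih =>
    by_cases hb : p b
    · rw [List.filter_cons_of_pos (by simpa using hb)]
      simp only [List.map_cons, List.sum_cons, ih, if_pos hb]
      ring
    · rw [List.filter_cons_of_neg (by simpa using hb)]
      simp only [List.map_cons, List.sum_cons, ih, if_neg hb]
      ring

theorem cnt_eq (ad bd : List (List Int)) :
    (innerB (PySem.List.sorted (pvDist bd).items (fun p => p.1) false)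
            (PySem.List.sorted (pvDist ad).items (fun p => p.1) false)).1
    = (((prodSums ad).map (fun a =>
          PySem.List.bisectLeft (PySem.List.sorted (prodSums bd) (fun x => x) false) a)).sum : Int) := by
  obtain ⟨hndA, hsubA, hcntA⟩ := goodC_dist ad
  obtain ⟨hndB, hsubB, hcntB⟩ := goodC_dist bd
  set aI := PySem.List.sorted (pvDist ad).items (fun p => p.1) false with haI
  set bI := PySem.List.sorted (pvDist bd).items (fun p => p.1) false with hbI
  have hbp : bI.Pairwise (fun p q => p.1 ≤ q.1) := PySem.List.sorted_pairwise _ _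
  have hap : aI.Pairwise (fun p q => p.1 ≤ q.1) := PySem.List.sorted_pairwise _ _
  -- B side: closed form of the merge loop
  have h0 : ((0:Int), (0:Nat), (0:Int)) = ((0:Int), (0:Nat), sumTake bI 0) := by
    simp [sumTake]
  unfold innerB
  rw [h0, innerB_closed bI hbp aI hap 0 0 (fun p _ => Nat.zero_le _), zero_add]
  -- filtSum over the sorted b-items is the weighted count of b-sums below k
  have hfs : ∀ k : Int, filtSum bI k
      = ((prodSums bd).countP (fun x => decide (x < k)) : Int) := by
    intro k
    have hperm : (bI.filter (fun p => decide (p.1 < k))).Perm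
        ((pvDist bd).items.filter (fun p => decide (p.1 < k))) :=
      (PySem.List.sorted_perm _ _ _).filter _
    have e1 : filtSum bI k
        = (((pvDist bd).items.filter (fun p => decide (p.1 < k))).map (fun p => p.2)).sum := by
      unfold filtSum
      exact (hperm.map (fun p => p.2)).sum_eq
    rw [e1, PySem.Dict.items_eq_map_keys (pvDist bd) hndB 0, List.filter_map, List.map_map]
    have e2 : ((pvDist bd).keys.filter ((fun p : Int × Int => decide (p.1 < k)) ∘
          (fun k' => (k', (pvDist bd).getD k' 0)))).map ((fun p : Int × Int => p.2) ∘
          (fun k' => (k', (pvDist bd).getD k' 0)))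
        = ((pvDist bd).keys.filter (fun k' => decide (k' < k))).map
            (fun k' => ((prodSums bd).count k' : Int)) := by
      have : ((fun p : Int × Int => decide (p.1 < k)) ∘
          (fun k' : Int => (k', (pvDist bd).getD k' 0))) = (fun k' : Int => decide (k' < k)) := by
        funext k'; rfl
      rw [this]
      apply List.map_congr_left
      intro k' _
      simp [Function.comp, hcntB k']
    rw [e2, filter_sum_ite (fun k' => ((prodSums bd).count k' : Int)) (fun k' => k' < k),
      countG (fun k' => if k' < k then 1 else 0) (prodSums bd) (pvDist bd).keys hndB hsubB]
    simpa using PySem.List.sum_map_ite_one_zero (fun x : Int => decide (x < k)) (prodSums bd)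
  -- a side: group by distinct a-sums
  have e3 : (aI.map (fun p => p.2 * filtSum bI p.1)).sum
      = ((pvDist ad).items.map (fun p => p.2 * filtSum bI p.1)).sum :=
    ((PySem.List.sorted_perm _ _ _).map _).sum_eq
  rw [e3, PySem.Dict.items_eq_map_keys (pvDist ad) hndA 0, List.map_map]
  have e4 : ((pvDist ad).keys.map ((fun p : Int × Int => p.2 * filtSum bI p.1) ∘
        (fun k' => (k', (pvDist ad).getD k' 0))))
      = (pvDist ad).keys.map (fun k' => ((prodSums ad).count k' : Int) *
          ((prodSums bd).countP (fun x => decide (x < k')) : Int)) := by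
    apply List.map_congr_left
    intro k' _
    simp [Function.comp, hcntA k', hfs k']
  rw [e4, countG (fun k' => ((prodSums bd).countP (fun x => decide (x < k')) : Int))
      (prodSums ad) (pvDist ad).keys hndA hsubA]
  -- A side: bisect on the sorted b-sums is countP on the raw b-sums
  have hAb : ∀ a : Int,
      PySem.List.bisectLeft (PySem.List.sorted (prodSums bd) (fun x => x) false) a
      = (prodSums bd).countP (fun x => decide (x < a)) := by
    intro a
    rw [bisectLeft_eq_countP _ a (by
      simpa using PySem.List.sorted_pairwise (prodSums bd) (fun x => x))]
    exact (PySem.List.sorted_perm (prodSums bd) (fun x => x) false).countP_eq _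
  have e5 : ((prodSums ad).map (fun a =>
        PySem.List.bisectLeft (PySem.List.sorted (prodSums bd) (fun x => x) false) a))
      = (prodSums ad).map (fun a => (prodSums bd).countP (fun x => decide (x < a))) := by
    apply List.map_congr_left
    intro a _
    exact hAb a
  rw [e5, ← castSum]

-- ---------- the partition loops agree ----------

theorem step_rel (dice : List (List Int)) (comb : List Int)
    (stA : Nat × Option (List Int)) (stB : Int × Option (List Int))
    (h1 : stB.1 = (stA.1 : Int)) (h2 : stB.2 = stA.2) :
    (stepB dice stB comb).1 = ((stepA dice stA comb).1 : Int) ∧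
    (stepB dice stB comb).2 = (stepA dice stA comb).2 := by
  unfold stepA stepB
  simp only []
  rw [innerA_closed (PySem.List.sorted (prodSums (pvOthers dice (pvChoose dice comb)))
      (fun x => x) false) (some (comb.map (fun d => d + 1))) (prodSums (pvChoose dice comb))
      0 stA.1 stA.2 (Nat.zero_le _)]
  rw [cnt_eq (pvChoose dice comb) (pvOthers dice (pvChoose dice comb))]
  set S := ((prodSums (pvChoose dice comb)).map (fun a =>
      PySem.List.bisectLeft (PySem.List.sorted (prodSums (pvOthers dice (pvChoose dice comb)))
        (fun x => x) false) a)).sum with hS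
  simp only [zero_add]
  by_cases hc : stA.1 < S
  · have hc' : stB.1 < (S : Int) := by rw [h1]; exact_mod_cast hc
    rw [if_pos hc, if_pos hc, if_pos hc']
    exact ⟨rfl, rfl⟩
  · have hc' : ¬ stB.1 < (S : Int) := by rw [h1]; exact_mod_cast hc
    rw [if_neg hc, if_neg hc, if_neg hc']
    exact ⟨h1, h2⟩

theorem fold_rel (dice : List (List Int)) :
    ∀ (combs : List (List Int)) (stA : Nat × Option (List Int))
      (stB : Int × Option (List Int)),
      stB.1 = (stA.1 : Int) → stB.2 = stA.2 →
      (combs.foldl (stepB dice) stB).1 = ((combs.foldl (stepA dice) stA).1 : Int) ∧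
      (combs.foldl (stepB dice) stB).2 = (combs.foldl (stepA dice) stA).2 := by
  intro combs
  induction combs with
  | nil => intro stA stB h1 h2; exact ⟨h1, h2⟩
  | cons comb t ih =>
    intro stA stB h1 h2
    obtain ⟨g1, g2⟩ := step_rel dice comb stA stB h1 h2
    exact ih _ _ g1 g2

theorem solution_eq_alt (dice : List (List Int)) : solution dice = solution_alt dice := by
  unfold solution solution_alt
  obtain ⟨_, h2⟩ := fold_rel dice
    (PySem.List.combinations (PySem.List.pyRange 0 (dice.length : Int) 1) (dice.length / 2))
    (0, none) (0, none) rfl rfl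
  rw [h2]

-- ===== VERDICT (by name: the statement is the Claim_ definition above) =====
theorem solution_spec : Claim_equal_solution := by
  intro dice _ _
  unfold Spec_solution
  exact solution_eq_alt dice
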